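-- pv_equiv track=rewrite | github.com/hillbean89/CSOChillburn | assignments/falling apart/falling apart.py | falling_apart
-- ===== SOURCE A (Python) =====
-- def falling_apart(list):
--     alice=0
--     bob=0
--
--     while list:
--         alice += max(list)
--         list.remove(max(list))
--         #alice.append(max(List))
--         #alice_score=sum(alice)
--
--         if list:
--             bob += max(list)
--             list.remove(max(list))
--
--     #print (alice,bob)
--     return alice,bob
-- ===== SOURCE B (Python) =====
-- def falling_apart(list):
--     # Sort once in descending order; alternate the values between alice and bob.
--     # (Note: unlike the original, this does not empty the caller's list.)
--     alice = 0
--     bob = 0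
--     alice_turn = True
--     for v in sorted(list, reverse=True):
--         if alice_turn:
--             alice += v
--         else:
--             bob += v
--         alice_turn = not alice_turn
--     return alice, bob
-- ===== Notes on version B (the rewrite author's own statement) =====
-- stated objective: faster
-- what changed: Replaces the repeated max()+remove() scans of the shrinking list with a single descending sort followed by one alternating pass (and B does not mutate the caller's list, which A empties).
import Mathlib
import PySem

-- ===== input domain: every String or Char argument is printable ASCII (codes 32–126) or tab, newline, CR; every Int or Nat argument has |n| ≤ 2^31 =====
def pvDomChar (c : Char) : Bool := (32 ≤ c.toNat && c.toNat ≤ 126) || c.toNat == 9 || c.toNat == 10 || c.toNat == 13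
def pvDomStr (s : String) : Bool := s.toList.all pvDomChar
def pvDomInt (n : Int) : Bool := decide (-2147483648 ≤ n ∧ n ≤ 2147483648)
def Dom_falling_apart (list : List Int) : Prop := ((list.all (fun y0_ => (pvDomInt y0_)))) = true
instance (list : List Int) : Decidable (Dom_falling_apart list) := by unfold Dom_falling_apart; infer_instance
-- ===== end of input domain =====

-- B replaces A's repeated max()+remove() scans with one descending sort and a single
-- alternating pass (faster, O(n log n) vs O(n^2)); equivalence is about the RETURN value
-- only: A empties its argument list in place, B does not mutate it.

-- ===== PORT A =====
-- the while-loop of A, with fuel making the recursion structural (list.length is always enough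
-- fuel: each iteration removes at least one element); otherwise a step-for-step transliteration
def falling_apart_loop : Nat → List Int → Int → Int → Int × Int
  | 0, _, alice, bob => (alice, bob)
  | Nat.succ fuel, l, alice, bob =>
    if l = [] then (alice, bob) else
    match PySem.List.max? l (fun x => x) with
    | none => (alice, bob)
    | some m =>
      match PySem.List.remove? l m with
      | none => (alice, bob)
      | some l1 =>
        if l1 = [] then (alice + m, bob) else
        match PySem.List.max? l1 (fun x => x) with
        | none => (alice + m, bob)
        | some m1 =>
          match PySem.List.remove? l1 m1 with
          | none => (alice + m, bob)
          | some l2 => falling_apart_loop fuel l2 (alice + m) (bob + m1)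

def falling_apart (list : List Int) : Int × Int :=
  falling_apart_loop list.length list 0 0

-- ===== PORT B =====
def fb_step (st : Int × Int × Bool) (v : Int) : Int × Int × Bool :=
  if st.2.2 then (st.1 + v, st.2.1, !st.2.2) else (st.1, st.2.1 + v, !st.2.2)

def falling_apart_alt (list : List Int) : Int × Int :=
  let st := (PySem.List.sorted list (fun x => x) true).foldl fb_step (0, 0, true)
  (st.1, st.2.1)

-- ===== PRECONDITION & SPEC =====
def Spec_falling_apart (list : List Int) (out : Int × Int) : Prop := out = falling_apart_alt list
instance (list : List Int) (out : Int × Int) : Decidable (Spec_falling_apart list out) := by unfold Spec_falling_apart; infer_instance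

-- ===== CLAIM (what is proved, stated in full; the proofs are below) =====
def Claim_equal_falling_apart : Prop := ∀ (list : List Int), Dom_falling_apart list → Spec_falling_apart list (falling_apart list)

-- ===== LEMMAS AND PROOFS =====

-- popping the (first) maximum off the front of the descending sort
theorem sorted_desc_cons_max {l : List Int} {m : Int}
    (h : PySem.List.max? l (fun x => x) = some m) :
    PySem.List.sorted l (fun x => x) true = m :: PySem.List.sorted (l.erase m) (fun x => x) true := by
  have hv : m ∈ l := PySem.List.max?_mem h
  have hmax : ∀ y ∈ l, y ≤ m := PySem.List.max?_isMax h
  apply List.Perm.eq_of_pairwise (le := fun a b : Int => b ≤ a)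
  · intro a b _ _ h1 h2; omega
  · exact PySem.List.sorted_pairwise_rev l (fun x => x)
  · refine List.Pairwise.cons ?_ (PySem.List.sorted_pairwise_rev (l.erase m) (fun x => x))
    intro y hy
    exact hmax y (List.mem_of_mem_erase ((PySem.List.mem_sorted (l.erase m) (fun x => x) true y).mp hy))
  · exact (PySem.List.sorted_perm l (fun x => x) true).trans
      ((List.perm_cons_erase hv).trans
        ((PySem.List.sorted_perm (l.erase m) (fun x => x) true).cons m).symm)

theorem loop_eq_alt : ∀ (n : Nat) (l : List Int), l.length ≤ n → ∀ (a b : Int),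
    falling_apart_loop n l a b =
      (let st := (PySem.List.sorted l (fun x => x) true).foldl fb_step (a, b, true)
       (st.1, st.2.1)) := by
  intro n
  induction n with
  | zero =>
    intro l hl a b
    have : l = [] := List.eq_nil_of_length_eq_zero (Nat.le_zero.mp hl)
    subst this
    simp [falling_apart_loop, PySem.List.sorted]
  | succ n ih =>
    intro l hl a b
    by_cases hnil : l = []
    · subst hnil; simp [falling_apart_loop, PySem.List.sorted]
    · obtain ⟨m, hm⟩ : ∃ m, PySem.List.max? l (fun x => x) = some m := by
        cases h : PySem.List.max? l (fun x => x) with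
        | none => exact absurd ((PySem.List.max?_eq_none_iff l (fun x => x)).mp h) hnil
        | some m => exact ⟨m, rfl⟩
      have hvm : m ∈ l := PySem.List.max?_mem hm
      have hr : PySem.List.remove? l m = some (l.erase m) :=
        PySem.List.remove?_eq_some_erase l m hvm
      have hsort : PySem.List.sorted l (fun x => x) true
          = m :: PySem.List.sorted (l.erase m) (fun x => x) true := sorted_desc_cons_max hm
      have hlen1 : (l.erase m).length + 1 = l.length := by
        rw [List.length_erase_of_mem hvm]
        have := List.length_pos_of_mem hvm; omega
      by_cases hnil1 : l.erase m = []
      · rw [falling_apart_loop]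
        simp only [if_neg hnil, hm, hr, hsort, hnil1]
        simp [PySem.List.sorted, fb_step]
      · obtain ⟨m1, hm1⟩ : ∃ m1, PySem.List.max? (l.erase m) (fun x => x) = some m1 := by
          cases h : PySem.List.max? (l.erase m) (fun x => x) with
          | none => exact absurd ((PySem.List.max?_eq_none_iff (l.erase m) (fun x => x)).mp h) hnil1
          | some m1 => exact ⟨m1, rfl⟩
        have hvm1 : m1 ∈ l.erase m := PySem.List.max?_mem hm1
        have hr1 : PySem.List.remove? (l.erase m) m1 = some ((l.erase m).erase m1) :=
          PySem.List.remove?_eq_some_erase (l.erase m) m1 hvm1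
        have hsort1 : PySem.List.sorted (l.erase m) (fun x => x) true
            = m1 :: PySem.List.sorted ((l.erase m).erase m1) (fun x => x) true :=
          sorted_desc_cons_max hm1
        have hlen2 : ((l.erase m).erase m1).length + 1 = (l.erase m).length := by
          rw [List.length_erase_of_mem hvm1]
          have := List.length_pos_of_mem hvm1; omega
        rw [falling_apart_loop]
        simp only [if_neg hnil, hm, hr, if_neg hnil1, hm1, hr1]
        rw [ih _ (by omega), hsort, hsort1]
        simp [fb_step]

-- ===== VERDICT (by name: the statement is the Claim_ definition above) =====
theorem falling_apart_spec : Claim_equal_falling_apart := by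
  intro l _
  unfold Spec_falling_apart falling_apart falling_apart_alt
  exact loop_eq_alt l.length l (le_refl _) 0 0
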